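-- pv_equiv track=rewrite | github.com/cedricrupb/code_diff | code_diff/diff_utils.py | _has_incomplete_comment
-- ===== SOURCE A (Python) =====
-- def _has_incomplete_comment(lines):
--     is_incomplete2 = False
--     is_incomplete1 = False
--
--     for line in lines:
--         count2 = line.count("\"\"\"")
--         if count2 % 2 == 1: is_incomplete2 = not is_incomplete2
--
--         count1 = line.count("\'\'\'")
--         if count1 % 2 == 1: is_incomplete1 = not is_incomplete1
--
--     return is_incomplete1 or is_incomplete2
-- ===== SOURCE B (Python) =====
-- def _has_incomplete_comment(lines):
--     # Join the document with '\n' (a delimiter never contains a newline, so no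
--     # occurrence can straddle a joint), split the whole text by each triple-quote
--     # delimiter: an even number of chunks means an odd number of delimiters,
--     # i.e. an unclosed triple-quoted string.
--     text = "\n".join(lines)
--     return len(text.split("'''")) % 2 == 0 or len(text.split('"""')) % 2 == 0
-- ===== Notes on version B (the rewrite author's own statement) =====
-- stated objective: alternative
-- what changed: Instead of a per-line loop toggling two booleans on odd per-line delimiter counts, B joins the whole document with '\n' (a delimiter cannot straddle a joint since it contains no newline) and splits the joined text once by each triple-quote delimiter, reporting unclosed when the number of chunks is even.
import Mathlib
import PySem

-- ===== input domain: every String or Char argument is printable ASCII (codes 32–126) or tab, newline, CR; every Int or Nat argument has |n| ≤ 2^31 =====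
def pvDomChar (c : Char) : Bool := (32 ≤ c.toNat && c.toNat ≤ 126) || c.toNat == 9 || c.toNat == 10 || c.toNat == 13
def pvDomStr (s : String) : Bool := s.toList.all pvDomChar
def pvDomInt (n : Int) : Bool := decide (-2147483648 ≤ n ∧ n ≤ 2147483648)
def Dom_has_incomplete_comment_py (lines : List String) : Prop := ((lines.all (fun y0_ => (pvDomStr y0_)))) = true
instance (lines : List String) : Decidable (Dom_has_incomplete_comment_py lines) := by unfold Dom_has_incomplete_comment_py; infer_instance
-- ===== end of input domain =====

-- B joins the document with '\n' and splits the joined text once by each triple-quote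
-- delimiter (even chunk count = unclosed), instead of A's per-line toggling of two flags
-- (objective: alternative decomposition, same cost).

-- ===== PORT A =====
-- loop state: (is_incomplete2, is_incomplete1)
def has_incomplete_comment_py (lines : List String) : Bool :=
  let st := lines.foldl (fun (st : Bool × Bool) line =>
    let count2 := PySem.Str.count line "\"\"\""
    let st2 := if count2 % 2 == 1 then !st.1 else st.1
    let count1 := PySem.Str.count line "'''"
    let st1 := if count1 % 2 == 1 then !st.2 else st.2
    (st2, st1)) (false, false)
  st.2 || st.1

-- ===== PORT B =====
-- PySem.Chars.splitOn is str.split for a nonempty separator (both literals here are nonempty).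
def has_incomplete_comment_py_alt (lines : List String) : Bool :=
  let text := PySem.Str.join "\n" lines
  ((PySem.Chars.splitOn text.toList "'''".toList).length % 2 == 0) ||
  ((PySem.Chars.splitOn text.toList "\"\"\"".toList).length % 2 == 0)

-- ===== PRECONDITION & SPEC =====
def Spec_has_incomplete_comment_py (lines : List String) (out : Bool) : Prop := out = has_incomplete_comment_py_alt lines
instance (lines : List String) (out : Bool) : Decidable (Spec_has_incomplete_comment_py lines out) := by unfold Spec_has_incomplete_comment_py; infer_instance

-- ===== CLAIM (what is proved, stated in full; the proofs are below) =====
def Claim_equal_has_incomplete_comment_py : Prop := ∀ (lines : List String), Dom_has_incomplete_comment_py lines → Spec_has_incomplete_comment_py lines (has_incomplete_comment_py lines)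

-- ===== LEMMAS AND PROOFS =====

lemma count_go_eval (sep : List Char) (hsep : sep ≠ []) :
    ∀ (fuel : Nat) (l : List Char) (acc : Nat), l.length ≤ fuel →
      PySem.Chars.count.go sep fuel l acc = acc + PySem.Chars.count l sep := by
  intro fuel
  induction fuel using Nat.strong_induction_on with
  | _ fuel ih =>
    intro l acc h
    have hl : 0 < sep.length := by cases sep <;> simp_all
    have hie : sep.isEmpty = false := by cases sep <;> simp_all
    rcases fuel with _ | fuel
    · have : l = [] := by cases l <;> simp_all
      subst this
      rw [PySem.Chars.count.go.eq_def]
      simp [PySem.Chars.count, hie, PySem.Chars.count.go]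
    · rcases l with _ | ⟨c, t⟩
      · rw [PySem.Chars.count.go.eq_def]
        simp [PySem.Chars.count, hie, PySem.Chars.count.go]
      · rw [PySem.Chars.count.go.eq_def]
        simp only [PySem.Chars.count, hie, Bool.false_eq_true, if_false]
        have hcnt : PySem.Chars.count.go sep (t.length + 1) (c :: t) 0 =
            (if sep.isPrefixOf (c :: t) = true then
              PySem.Chars.count.go sep t.length (List.drop sep.length (c :: t)) 1
            else PySem.Chars.count.go sep t.length t 0) := by
          rw [PySem.Chars.count.go.eq_def]
        simp only [List.length_cons]
        rw [hcnt]
        have hdl : (List.drop sep.length (c :: t)).length ≤ t.length := by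
          simp [List.length_drop]; omega
        have hft : t.length ≤ fuel := by simp at h; omega
        split
        · rw [ih fuel (by omega) _ (acc + 1) (le_trans hdl hft),
            ih t.length (by omega) _ 1 hdl]
          simp only [PySem.Chars.count, hie, Bool.false_eq_true, if_false]
          omega
        · rw [ih fuel (by omega) t acc hft, ih t.length (by omega) t 0 le_rfl]
          simp only [PySem.Chars.count, hie, Bool.false_eq_true, if_false]
          omega

lemma count_nil (sep : List Char) (hsep : sep ≠ []) : PySem.Chars.count [] sep = 0 := by
  have hie : sep.isEmpty = false := by cases sep <;> simp_all
  simp [PySem.Chars.count, hie, PySem.Chars.count.go]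

lemma count_cons (sep : List Char) (hsep : sep ≠ []) (c : Char) (t : List Char) :
    PySem.Chars.count (c :: t) sep =
      (if sep.isPrefixOf (c :: t) then 1 + PySem.Chars.count (List.drop sep.length (c :: t)) sep
       else PySem.Chars.count t sep) := by
  have hie : sep.isEmpty = false := by cases sep <;> simp_all
  have hdl : (List.drop sep.length (c :: t)).length ≤ t.length := by
    have : 0 < sep.length := by cases sep <;> simp_all
    simp [List.length_drop]; omega
  have hcnt : PySem.Chars.count.go sep (t.length + 1) (c :: t) 0 =
      (if sep.isPrefixOf (c :: t) = true then
        PySem.Chars.count.go sep t.length (List.drop sep.length (c :: t)) (0 + 1)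
      else PySem.Chars.count.go sep t.length t 0) := by
    rw [PySem.Chars.count.go.eq_def]
  conv_lhs => rw [PySem.Chars.count]
  simp only [hie, Bool.false_eq_true, if_false, List.length_cons]
  rw [hcnt]
  split
  · rw [count_go_eval sep hsep t.length _ (0 + 1) hdl]
  · rw [count_go_eval sep hsep t.length t 0 le_rfl]
    simp

lemma splitOn_go_len (sep : List Char) (hsep : sep ≠ []) :
    ∀ (fuel : Nat) (l cur : List Char) (acc : List (List Char)), l.length < fuel →
      (PySem.Chars.splitOn.go sep fuel l cur acc).length
        = acc.length + 1 + PySem.Chars.count l sep := by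
  intro fuel
  induction fuel using Nat.strong_induction_on with
  | _ fuel ih =>
    intro l cur acc h
    have hl : 0 < sep.length := by cases sep <;> simp_all
    rcases fuel with _ | fuel
    · omega
    · rcases l with _ | ⟨c, t⟩
      · rw [PySem.Chars.splitOn.go.eq_def]
        simp [count_nil sep hsep]
      · rw [PySem.Chars.splitOn.go.eq_def]
        simp only
        rw [count_cons sep hsep]
        have hdl : (List.drop sep.length (c :: t)).length ≤ t.length := by
          simp [List.length_drop]; omega
        have hft : t.length < fuel := by simp at h; omega
        split
        · rw [ih fuel (by omega) _ [] _ (by omega)]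
          simp; omega
        · rw [ih fuel (by omega) t (c :: cur) acc hft]

lemma splitOn_length (sep : List Char) (hsep : sep ≠ []) (s : List Char) :
    (PySem.Chars.splitOn s sep).length = PySem.Chars.count s sep + 1 := by
  rw [PySem.Chars.splitOn, splitOn_go_len sep hsep (s.length + 1) s [] [] (by omega)]
  simp; omega

lemma prefix_append_nl (sep : List Char) (hnl : '\n' ∉ sep)
    (xs ys : List Char) :
    sep.isPrefixOf (xs ++ '\n' :: ys) = sep.isPrefixOf xs := by
  rw [Bool.eq_iff_iff]
  by_cases hp : sep <+: xs
  · simp [List.isPrefixOf_iff_prefix, hp, hp.trans (List.prefix_append xs ('\n' :: ys))]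
  · have h2 : ¬ sep <+: (xs ++ '\n' :: ys) := by
      intro hq
      by_cases hk : sep.length ≤ xs.length
      · apply hp
        rw [List.prefix_iff_eq_take] at hq
        rw [List.take_append_of_le_length hk] at hq
        exact hq ▸ List.take_prefix sep.length xs
      · apply hnl
        have hix : xs.length < sep.length := by omega
        have := hq.getElem hix
        rw [List.getElem_append_right (le_refl xs.length)] at this
        simp at this
        rw [← this]
        exact List.getElem_mem hix
    simp [List.isPrefixOf_iff_prefix, hp, h2]

lemma count_append_nl (sep : List Char) (hsep : sep ≠ []) (hnl : '\n' ∉ sep)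
    (xs ys : List Char) :
    PySem.Chars.count (xs ++ '\n' :: ys) sep
      = PySem.Chars.count xs sep + PySem.Chars.count ys sep := by
  have hl : 0 < sep.length := by cases sep <;> simp_all
  suffices H : ∀ (n : Nat) (xs : List Char), xs.length ≤ n →
      PySem.Chars.count (xs ++ '\n' :: ys) sep
        = PySem.Chars.count xs sep + PySem.Chars.count ys sep by
    exact H xs.length xs le_rfl
  have hbase : PySem.Chars.count ('\n' :: ys) sep = PySem.Chars.count ys sep := by
    rw [count_cons sep hsep]
    have h0 : sep.isPrefixOf ('\n' :: ys) = sep.isPrefixOf [] := prefix_append_nl sep hnl [] ys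
    have h1 : sep.isPrefixOf ([] : List Char) = false := by cases sep <;> simp_all
    rw [h0, h1]
    simp
  intro n
  induction n with
  | zero =>
    intro xs hxs
    have : xs = [] := by cases xs <;> simp_all
    subst this
    rw [List.nil_append, hbase, count_nil sep hsep]
    omega
  | succ n ihn =>
    intro xs hxs
    rcases xs with _ | ⟨c, t⟩
    · rw [List.nil_append, hbase, count_nil sep hsep]
      omega
    · rw [List.cons_append, count_cons sep hsep, ← List.cons_append,
        prefix_append_nl sep hnl (c :: t) ys, count_cons sep hsep c t]
      split
      · next hpre =>
        have hle : sep.length ≤ (c :: t).length :=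
          (List.isPrefixOf_iff_prefix.mp hpre).length_le
        rw [List.drop_append_of_le_length hle]
        rw [ihn _ (by simp [List.length_drop]; simp at hxs; omega)]
        omega
      · rw [ihn t (by simp at hxs; omega)]

lemma count_join (sep : List Char) (hsep : sep ≠ []) (hnl : '\n' ∉ sep)
    (lines : List String) :
    PySem.Chars.count (PySem.Chars.join ['\n'] (lines.map String.toList)) sep
      = (lines.map (fun line => PySem.Chars.count line.toList sep)).sum := by
  induction lines with
  | nil => simp [PySem.Chars.join_nil, count_nil sep hsep]
  | cons a rest ih =>
    rcases rest with _ | ⟨b, r⟩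
    · simp [PySem.Chars.join_singleton]
    · simp only [List.map_cons] at ih ⊢
      rw [PySem.Chars.join_cons_cons]
      have : a.toList ++ ['\n'] ++ PySem.Chars.join ['\n'] (b.toList :: List.map String.toList r)
          = a.toList ++ '\n' :: PySem.Chars.join ['\n'] (b.toList :: List.map String.toList r) := by
        simp
      rw [this, count_append_nl sep hsep hnl, ih]
      simp

lemma parity_add (a b : Nat) : ((a + b) % 2 == 1) = ((a % 2 == 1) ^^ (b % 2 == 1)) := by
  rcases Nat.mod_two_eq_zero_or_one a with h | h <;>
    rcases Nat.mod_two_eq_zero_or_one b with h' | h' <;>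
      simp [Nat.add_mod, h, h']

lemma toggle_eq (c : Nat) (b : Bool) : (if c % 2 == 1 then !b else b) = (b ^^ (c % 2 == 1)) := by
  cases h : (c % 2 == 1) <;> simp

lemma loop_eq (lines : List String) (b2 b1 : Bool) :
    lines.foldl (fun (st : Bool × Bool) line =>
      let count2 := PySem.Str.count line "\"\"\""
      let st2 := if count2 % 2 == 1 then !st.1 else st.1
      let count1 := PySem.Str.count line "'''"
      let st1 := if count1 % 2 == 1 then !st.2 else st.2
      (st2, st1)) (b2, b1)
    = (b2 ^^ (((lines.map (fun line => PySem.Str.count line "\"\"\"")).sum % 2 == 1)),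
       b1 ^^ (((lines.map (fun line => PySem.Str.count line "'''")).sum % 2 == 1))) := by
  induction lines generalizing b2 b1 with
  | nil => simp
  | cons l rest ih =>
    simp only [List.foldl_cons]
    rw [ih]
    simp only [List.map_cons, List.sum_cons, toggle_eq, parity_add, Bool.xor_assoc]

lemma succ_parity (n : Nat) : ((n + 1) % 2 == 0) = (n % 2 == 1) := by
  rcases Nat.mod_two_eq_zero_or_one n with h | h <;> simp [Nat.add_mod, h]

-- ===== VERDICT (by name: the statement is the Claim_ definition above) =====
theorem has_incomplete_comment_py_spec : Claim_equal_has_incomplete_comment_py := by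
  intro lines _
  show _ = _
  simp only [has_incomplete_comment_py, has_incomplete_comment_py_alt, loop_eq, Bool.false_xor,
    PySem.Str.toList_join]
  have hnl : "\n".toList = ['\n'] := rfl
  rw [hnl,
    splitOn_length "'''".toList (by decide) _,
    splitOn_length "\"\"\"".toList (by decide) _,
    count_join "'''".toList (by decide) (by decide),
    count_join "\"\"\"".toList (by decide) (by decide)]
  simp only [succ_parity, PySem.Str.count_eq]
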